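-- pv_equiv track=rewrite | github.com/dimi-fn/Various-Data-Science-Scripts | Unit_testing/Codility/Maximum_Slice_Problem/Max_Profit.py | solution
-- ===== SOURCE A (Python) =====
-- def solution(A):
--
--     revenues_all_combinations = []
--
--     max_difference_days = len(A)-1
--
--     difference_day = 1
--
--     while difference_day <= max_difference_days:
--
--         for i in range (difference_day, len(A)):
--
--             if A[i] > 0:
--                 difference = A[i] - A[i-difference_day]
--                 revenues_all_combinations.append(difference)
--         difference_day+=1
--
--     if len(revenues_all_combinations)==0 or max(revenues_all_combinations) <=0:
--         return 0
--     else: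
--         return max(revenues_all_combinations)
-- ===== SOURCE B (Python) =====
-- def solution(A):
--     best = 0
--     if A:
--         m = A[0]
--         for x in A[1:]:
--             if x > 0 and x - m > best:
--                 best = x - m
--             if x < m:
--                 m = x
--     return best
-- ===== Notes on version B (the rewrite author's own statement) =====
-- stated objective: faster
-- what changed: Replaced the O(n^2) enumeration of all (day-gap, day) pairs collected into a list and maxed at the end by a single left-to-right pass that keeps the running minimum of previous prices and the best profit so far.
import Mathlib
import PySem

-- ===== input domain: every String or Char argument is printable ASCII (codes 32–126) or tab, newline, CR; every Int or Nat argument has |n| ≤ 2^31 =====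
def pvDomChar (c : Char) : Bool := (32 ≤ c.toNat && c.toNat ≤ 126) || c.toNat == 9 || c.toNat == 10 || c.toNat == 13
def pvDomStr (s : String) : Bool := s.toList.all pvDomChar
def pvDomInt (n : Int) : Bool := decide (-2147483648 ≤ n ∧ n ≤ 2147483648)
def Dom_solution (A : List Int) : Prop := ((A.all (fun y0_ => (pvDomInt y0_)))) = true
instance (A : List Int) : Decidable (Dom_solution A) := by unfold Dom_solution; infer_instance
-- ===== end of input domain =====

-- B replaces A's O(n^2) collection of every pair difference with a single left-to-right pass
-- keeping the running minimum of previous elements and the best profit so far (objective: faster).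

-- ===== PORT A =====
def solution (A : List Int) : Int :=
  let n : Int := A.length
  let maxDifferenceDays : Int := n - 1
  let revenues : List Int :=
    (PySem.List.pyRange 1 (maxDifferenceDays + 1)).foldl (fun acc d =>
      (PySem.List.pyRange d n).foldl (fun acc2 i =>
        if 0 < PySem.List.pyGetD A i 0 then
          acc2 ++ [PySem.List.pyGetD A i 0 - PySem.List.pyGetD A (i - d) 0]
        else acc2) acc) []
  match PySem.List.max? revenues (fun y => y) with
  | none => 0
  | some m => if m ≤ 0 then 0 else m

-- ===== PORT B =====
def solution_alt (A : List Int) : Int :=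
  match A with
  | [] => 0
  | a :: rest =>
    (rest.foldl (fun (p : Int × Int) x =>
        (if 0 < x ∧ p.1 < x - p.2 then x - p.2 else p.1,
         if x < p.2 then x else p.2)) (0, a)).1

-- ===== PRECONDITION & SPEC =====
def Spec_solution (A : List Int) (out : Int) : Prop := out = solution_alt A
instance (A : List Int) (out : Int) : Decidable (Spec_solution A out) := by unfold Spec_solution; infer_instance

-- ===== CLAIM (what is proved, stated in full; the proofs are below) =====
def Claim_equal_solution : Prop := ∀ (A : List Int), Dom_solution A → Spec_solution A (solution A)

-- ===== LEMMAS AND PROOFS =====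

-- A's revenue list, rewritten as one flat list of the pair differences in A's enumeration order
def pvRev (A : List Int) : List Int :=
  (PySem.List.pyRange 1 ((A.length : Int) - 1 + 1)).flatMap (fun d =>
    (((PySem.List.pyRange d (A.length : Int)).filter
        (fun i => decide (0 < PySem.List.pyGetD A i 0))).map
      (fun i => PySem.List.pyGetD A i 0 - PySem.List.pyGetD A (i - d) 0)))

lemma rev_eq (A : List Int) :
    (PySem.List.pyRange 1 (((A.length : Int) - 1) + 1)).foldl (fun acc d =>
      (PySem.List.pyRange d (A.length : Int)).foldl (fun acc2 i =>
        if 0 < PySem.List.pyGetD A i 0 then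
          acc2 ++ [PySem.List.pyGetD A i 0 - PySem.List.pyGetD A (i - d) 0]
        else acc2) acc) [] = pvRev A := by
  unfold pvRev
  have h1 := PySem.List.foldl_congr_mem
    (l := PySem.List.pyRange 1 (((A.length : Int) - 1) + 1)) (init := ([] : List Int))
    (f := fun acc d =>
      (PySem.List.pyRange d (A.length : Int)).foldl (fun acc2 i =>
        if 0 < PySem.List.pyGetD A i 0 then
          acc2 ++ [PySem.List.pyGetD A i 0 - PySem.List.pyGetD A (i - d) 0]
        else acc2) acc)
    (g := fun acc d =>
      acc ++ ((PySem.List.pyRange d (A.length : Int)).filter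
          (fun i => decide (0 < PySem.List.pyGetD A i 0))).map
        (fun i => PySem.List.pyGetD A i 0 - PySem.List.pyGetD A (i - d) 0))
    (by
      intro acc d _
      dsimp only
      rw [← PySem.List.foldl_append_if]
      apply PySem.List.foldl_congr_mem
      intro acc2 i _
      simp)
  rw [h1, PySem.List.foldl_append_eq_flatMap, List.nil_append]

lemma mem_pvRev (A : List Int) (x : Int) :
    x ∈ pvRev A ↔ ∃ i j : Nat, j < i ∧ i < A.length ∧ 0 < A.getD i 0 ∧
      x = A.getD i 0 - A.getD j 0 := by
  simp only [pvRev, List.mem_flatMap, List.mem_map, List.mem_filter,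
    PySem.List.mem_pyRange_one, decide_eq_true_eq]
  constructor
  · rintro ⟨d, ⟨hd1, hd2⟩, i, ⟨⟨hdi, hin⟩, hpos⟩, rfl⟩
    refine ⟨i.toNat, (i - d).toNat, by omega, by omega, ?_, ?_⟩
    · rwa [PySem.List.pyGetD_eq_getElem A 0 (by omega) (by omega), ← List.getD_eq_getElem _ 0 (by omega)] at hpos
    · rw [PySem.List.pyGetD_eq_getElem A 0 (by omega) (by omega),
        PySem.List.pyGetD_eq_getElem A 0 (by omega) (by omega),
        ← List.getD_eq_getElem _ 0 (by omega), ← List.getD_eq_getElem _ 0 (by omega)]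
  · rintro ⟨i, j, hji, hin, hpos, rfl⟩
    refine ⟨(i : Int) - (j : Int), ⟨by omega, by omega⟩, (i : Int), ⟨⟨by omega, by omega⟩, ?_⟩, ?_⟩
    · simpa using hpos
    · have h2 : ((i : Int) - ((i : Int) - (j : Int))) = (j : Int) := by omega
      rw [h2]
      simp

-- B's candidate profits: one per position with positive value, against the running minimum
def pvCands (m : Int) : List Int → List Int
  | [] => []
  | x :: l => (if 0 < x then [x - m] else []) ++ pvCands (min m x) l

lemma alt_fold (l : List Int) (b m : Int) :
    l.foldl (fun (p : Int × Int) x =>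
        (if 0 < x ∧ p.1 < x - p.2 then x - p.2 else p.1,
         if x < p.2 then x else p.2)) (b, m)
      = ((pvCands m l).foldl max b, l.foldl min m) := by
  induction l generalizing b m with
  | nil => simp [pvCands]
  | cons x l ih =>
    simp only [List.foldl_cons, ih]
    have hmin : (if x < m then x else m) = min m x := by rw [min_def]; split_ifs <;> omega
    rw [hmin]
    by_cases hx : 0 < x
    · have hmax : (if 0 < x ∧ b < x - m then x - m else b) = max b (x - m) := by
        rw [max_def]; split_ifs <;> omega
      rw [hmax]
      simp [pvCands, hx]
    · have hmax : (if 0 < x ∧ b < x - m then x - m else b) = b := by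
        split_ifs <;> omega
      rw [hmax]
      simp [pvCands, hx]

lemma mem_pvCands (l : List Int) (m c : Int) :
    c ∈ pvCands m l ↔ ∃ i : Nat, i < l.length ∧ 0 < l.getD i 0 ∧
      c = l.getD i 0 - (l.take i).foldl min m := by
  induction l generalizing m with
  | nil => simp [pvCands]
  | cons x l ih =>
    simp only [pvCands, List.mem_append, ih]
    constructor
    · rintro (h | ⟨i, hi, hpos, rfl⟩)
      · have hx : 0 < x := by by_contra h0; simp [h0] at h
        simp [hx] at h
        exact ⟨0, by simp, by simpa, by simp [h]⟩
      · exact ⟨i + 1, by simpa using hi, by simpa using hpos, by simp⟩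
    · rintro ⟨i, hi, hpos, rfl⟩
      match i with
      | 0 =>
        left
        simp only [List.getD_cons_zero] at hpos
        simp [hpos]
      | i + 1 =>
        right
        exact ⟨i, by simpa using hi, by simpa using hpos, by simp⟩

lemma cands_sub_rev (a : Int) (rest : List Int) (c : Int) (hc : c ∈ pvCands a rest) :
    c ∈ pvRev (a :: rest) := by
  rw [mem_pvCands] at hc
  obtain ⟨i, hi, hpos, rfl⟩ := hc
  rcases PySem.List.foldl_min_mem (rest.take i) a with hm | hm
  · rw [mem_pvRev]
    exact ⟨i + 1, 0, by omega, by simpa using hi, by simpa using hpos, by simp [hm]⟩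
  · obtain ⟨k, hk, hkv⟩ := List.getElem_of_mem hm
    have hk' : k < i ∧ k < rest.length := by
      have := hk; simp [List.length_take] at this; omega
    rw [mem_pvRev]
    refine ⟨i + 1, k + 1, by omega, by simpa using hi, by simpa using hpos, ?_⟩
    have : (rest.take i).foldl min a = rest.getD k 0 := by
      rw [← hkv, List.getElem_take, List.getD_eq_getElem _ 0 hk'.2]
    simp [this]

lemma rev_le_alt (a : Int) (rest : List Int) (x : Int) (hx : x ∈ pvRev (a :: rest)) :
    x ≤ (pvCands a rest).foldl max 0 := by
  rw [mem_pvRev] at hx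
  obtain ⟨i, j, hji, hin, hpos, rfl⟩ := hx
  obtain ⟨i', rfl⟩ : ∃ i', i = i' + 1 := ⟨i - 1, by omega⟩
  have hi' : i' < rest.length := by simpa using hin
  have hc : rest.getD i' 0 - (rest.take i').foldl min a ∈ pvCands a rest := by
    rw [mem_pvCands]
    exact ⟨i', hi', by simpa using hpos, rfl⟩
  have hub := (PySem.List.le_foldl_max (pvCands a rest) 0).2 _ hc
  refine le_trans ?_ hub
  have hmin : (rest.take i').foldl min a ≤ (a :: rest).getD j 0 := by
    match j with
    | 0 => simpa using (PySem.List.foldl_min_le (rest.take i') a).1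
    | j + 1 =>
      have hj' : j < i' ∧ j < rest.length := by constructor <;> omega
      have hmem : rest.getD j 0 ∈ rest.take i' := by
        have : (rest.take i')[j]'(by simp [List.length_take]; omega) = rest.getD j 0 := by
          rw [List.getElem_take, List.getD_eq_getElem _ 0 hj'.2]
        rw [← this]
        exact List.getElem_mem _
      simpa using (PySem.List.foldl_min_le (rest.take i') a).2 _ hmem
  have hgi : (a :: rest).getD (i' + 1) 0 = rest.getD i' 0 := by simp
  omega

lemma main_eq (a : Int) (rest : List Int) :
    solution (a :: rest) = solution_alt (a :: rest) := by
  have halt : solution_alt (a :: rest) = (pvCands a rest).foldl max 0 := by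
    simp [solution_alt, alt_fold]
  rw [halt]
  show (match PySem.List.max? ((PySem.List.pyRange 1 ((((a :: rest).length : Int) - 1) + 1)).foldl (fun acc d =>
      (PySem.List.pyRange d ((a :: rest).length : Int)).foldl (fun acc2 i =>
        if 0 < PySem.List.pyGetD (a :: rest) i 0 then
          acc2 ++ [PySem.List.pyGetD (a :: rest) i 0 - PySem.List.pyGetD (a :: rest) (i - d) 0]
        else acc2) acc) []) (fun y => y) with
    | none => 0
    | some m => if m ≤ 0 then 0 else m) = (pvCands a rest).foldl max 0
  rw [rev_eq]
  have hB0 : (0 : Int) ≤ (pvCands a rest).foldl max 0 :=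
    (PySem.List.le_foldl_max (pvCands a rest) 0).1
  have hBmem := PySem.List.foldl_max_mem (pvCands a rest) 0
  rcases hr : PySem.List.max? (pvRev (a :: rest)) (fun y => y) with _ | M
  · have hempty := (PySem.List.max?_eq_none_iff _ _).1 hr
    simp only []
    rcases hBmem with h0 | hm
    · omega
    · exact absurd (cands_sub_rev a rest _ hm) (by simp [hempty])
  · have hMub := PySem.List.max?_isMax hr
    have hMmem := PySem.List.max?_mem hr
    simp only []
    by_cases hM : M ≤ 0
    · simp only [hM, if_true]
      rcases hBmem with h0 | hm
      · omega
      · have := hMub _ (cands_sub_rev a rest _ hm)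
        omega
    · simp only [hM, if_false]
      have h1 : M ≤ (pvCands a rest).foldl max 0 := rev_le_alt a rest M hMmem
      have h2 : (pvCands a rest).foldl max 0 ≤ M := by
        rcases hBmem with h0 | hm
        · omega
        · exact hMub _ (cands_sub_rev a rest _ hm)
      omega

-- ===== VERDICT (by name: the statement is the Claim_ definition above) =====
theorem solution_spec : Claim_equal_solution := by
  unfold Claim_equal_solution
  intro A _
  unfold Spec_solution
  match A with
  | [] => rfl
  | a :: rest => exact main_eq a rest
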